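-- pv_equiv track=rewrite | github.com/mehmetkaratslar/os-simulator-gui | utils/helpers.py | round_robin_next_process
-- ===== SOURCE A (Python) =====
-- def round_robin_next_process(processes, current_index, time_quantum):
--     """
--     Round Robin algoritması için bir sonraki prosesi belirler
--
--     Parametreler:
--     processes (list): Proses listesi
--     current_index (int): Mevcut proses indeksi
--     time_quantum (int): Zaman dilimi
--
--     Dönüş:
--     tuple: (Sonraki proses indeksi, çalışma süresi)
--     """
--     if not processes:
--         return None, 0
--
--     # Çalışabilir prosesler
--     runnable = [i for i, p in enumerate(processes) if p['remaining_time'] > 0]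
--
--     if not runnable:
--         return None, 0
--
--     # Sonraki proses indeksi
--     next_index = (current_index + 1) % len(processes)
--     while next_index not in runnable:
--         next_index = (next_index + 1) % len(processes)
--
--     # Çalışma süresi
--     run_time = min(time_quantum, processes[next_index]['remaining_time'])
--
--     return next_index, run_time
-- ===== SOURCE B (Python) =====
-- def round_robin_next_process(processes, current_index, time_quantum):
--     if not processes:
--         return None, 0
--     start = (current_index + 1) % len(processes)
--     first_any = None   # smallest runnable index overall
--     first_ge = None    # smallest runnable index >= start
--     for i, p in enumerate(processes):
--         if p['remaining_time'] > 0: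
--             if first_any is None:
--                 first_any = i
--             if first_ge is None and i >= start:
--                 first_ge = i
--     nxt = first_ge if first_ge is not None else first_any
--     if nxt is None:
--         return None, 0
--     return nxt, min(time_quantum, processes[nxt]['remaining_time'])
-- ===== Notes on version B (the rewrite author's own statement) =====
-- stated objective: alternative
-- what changed: Replaced A's circular scan (precomputed runnable-index list plus an unbounded modular while loop doing list-membership tests) with one linear left-to-right pass that records the first runnable index >= start and the first runnable index overall, then picks the former, falling back to the latter; no modular stepping and no membership scans.
import Mathlib
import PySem

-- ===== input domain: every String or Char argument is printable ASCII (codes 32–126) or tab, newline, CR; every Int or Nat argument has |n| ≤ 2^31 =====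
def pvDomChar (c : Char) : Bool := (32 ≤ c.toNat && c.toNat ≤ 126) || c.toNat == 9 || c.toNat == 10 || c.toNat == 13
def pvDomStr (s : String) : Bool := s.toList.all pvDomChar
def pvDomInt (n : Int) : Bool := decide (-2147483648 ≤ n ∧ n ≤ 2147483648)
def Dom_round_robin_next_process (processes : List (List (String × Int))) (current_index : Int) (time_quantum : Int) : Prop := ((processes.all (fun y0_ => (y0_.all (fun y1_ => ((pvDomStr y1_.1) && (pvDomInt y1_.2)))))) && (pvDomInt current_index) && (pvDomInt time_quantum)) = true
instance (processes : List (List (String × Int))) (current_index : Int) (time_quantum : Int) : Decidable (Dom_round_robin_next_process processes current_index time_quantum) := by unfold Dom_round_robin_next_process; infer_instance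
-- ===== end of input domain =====

-- B replaces A's circular modular scan (runnable list + unbounded membership-testing while
-- loop) with one linear pass recording the first runnable index >= start and the first
-- runnable index overall (objective: alternative).


-- ===== PORT A =====
-- p['remaining_time'] : first-match association-list lookup; the default 0 is only
-- reached outside Pre_ (Python raises KeyError there).
def pvRem (p : List (String × Int)) : Int :=
  (List.lookup "remaining_time" p).getD 0

-- the while loop, with fuel = len(processes): inside Pre_ (runnable nonempty) the
-- Python loop provably terminates within that many steps, so the fuel guard only
-- makes the same computation total.
def pvLoopA (n : Int) (runnable : List Int) : Nat → Int → Int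
  | 0, idx => idx
  | fuel+1, idx =>
      if runnable.contains idx then idx
      else pvLoopA n runnable fuel (PySem.Int.mod (idx + 1) n)

-- the list comprehension over enumerate(processes)
def pvRunnable (processes : List (List (String × Int))) : List Int :=
  ((PySem.List.enumerate processes).filter (fun ip => decide (0 < pvRem ip.2))).map (fun ip => ip.1)

def round_robin_next_process (processes : List (List (String × Int))) (current_index : Int) (time_quantum : Int) : Option Int × Int :=
  if processes = [] then (none, 0)
  else
    let runnable : List Int := pvRunnable processes
    if runnable = [] then (none, 0)
    else
      let n : Int := processes.length
      let start := PySem.Int.mod (current_index + 1) n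
      let next_index := pvLoopA n runnable processes.length start
      let run_time := min time_quantum (pvRem ((PySem.List.pyGet? processes next_index).getD []))
      (some next_index, run_time)

-- ===== PORT B =====
-- one step of B's for loop: state = (first_any, first_ge)
def pvStepB (start : Int) (st : Option Int × Option Int) (ip : Int × List (String × Int)) : Option Int × Option Int :=
  if 0 < pvRem ip.2 then
    ((if st.1 = none then some ip.1 else st.1),
     (if st.2 = none ∧ start ≤ ip.1 then some ip.1 else st.2))
  else st

def round_robin_next_process_alt (processes : List (List (String × Int))) (current_index : Int) (time_quantum : Int) : Option Int × Int :=
  if processes = [] then (none, 0)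
  else
    let n : Int := processes.length
    let start := PySem.Int.mod (current_index + 1) n
    let st := (PySem.List.enumerate processes).foldl (pvStepB start) (none, none)
    match (if st.2 = none then st.1 else st.2) with
    | none => (none, 0)
    | some j => (some j, min time_quantum (pvRem ((PySem.List.pyGet? processes j).getD [])))

-- ===== PRECONDITION & SPEC =====
-- Pre_ excludes exactly the inputs where some process dict lacks the key
-- 'remaining_time', on which Python A raises KeyError.
def Pre_round_robin_next_process (processes : List (List (String × Int))) (current_index : Int) (time_quantum : Int) : Prop :=
  ∀ p ∈ processes, (List.lookup "remaining_time" p).isSome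
instance (processes : List (List (String × Int))) (current_index : Int) (time_quantum : Int) : Decidable (Pre_round_robin_next_process processes current_index time_quantum) := by unfold Pre_round_robin_next_process; infer_instance

def pvWitness_round_robin_next_process : (List (List (String × Int))) × Int × Int :=
  ([[("remaining_time", 3)], [("remaining_time", 0)]], 0, 2)

def Spec_round_robin_next_process (processes : List (List (String × Int))) (current_index : Int) (time_quantum : Int) (out : Option Int × Int) : Prop := out = round_robin_next_process_alt processes current_index time_quantum
instance (processes : List (List (String × Int))) (current_index : Int) (time_quantum : Int) (out : Option Int × Int) : Decidable (Spec_round_robin_next_process processes current_index time_quantum out) := by unfold Spec_round_robin_next_process; infer_instance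

-- ===== CLAIM (what is proved, stated in full; the proofs are below) =====
def Claim_equal_round_robin_next_process : Prop := ∀ (processes : List (List (String × Int))) (current_index : Int) (time_quantum : Int), Dom_round_robin_next_process processes current_index time_quantum → Pre_round_robin_next_process processes current_index time_quantum → Spec_round_robin_next_process processes current_index time_quantum (round_robin_next_process processes current_index time_quantum)

-- ===== LEMMAS AND PROOFS =====

-- membership in the runnable list
theorem pvMemRunnable (processes : List (List (String × Int))) (j : Int) :
    j ∈ pvRunnable processes ↔
      ∃ (k : Nat) (h : k < processes.length), j = (k : Int) ∧ 0 < pvRem processes[k] := by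
  simp only [pvRunnable, List.mem_map, List.mem_filter, PySem.List.mem_enumerate_iff]
  constructor
  · rintro ⟨ip, ⟨⟨k, hk, rfl⟩, hpos⟩, rfl⟩
    exact ⟨k, hk, by simp, by simpa using hpos⟩
  · rintro ⟨k, hk, rfl, hpos⟩
    exact ⟨((0 : Int) + k, processes[k]), ⟨⟨k, hk, rfl⟩, by simpa using hpos⟩, by simp⟩

theorem pvRunnableBounds (processes : List (List (String × Int))) (j : Int)
    (h : j ∈ pvRunnable processes) : 0 ≤ j ∧ j < (processes.length : Int) := by
  obtain ⟨k, hk, rfl, -⟩ := (pvMemRunnable processes j).mp h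
  omega

theorem pvRunnableSorted (processes : List (List (String × Int))) :
    (pvRunnable processes).Pairwise (· < ·) := by
  unfold pvRunnable
  refine List.Pairwise.map _ (fun a b h => h) ?_
  exact List.Pairwise.filter _ (PySem.List.pairwise_lt_enumerate processes 0)

-- head of the ≥-filter of a sorted list containing idx is idx itself
theorem pvHeadFilterMem (R : List Int) (idx : Int) (hs : R.Pairwise (· < ·))
    (hm : idx ∈ R) : (R.filter (fun j => decide (idx ≤ j))).head? = some idx := by
  induction R with
  | nil => cases hm
  | cons a t ih =>
    rcases List.mem_cons.mp hm with rfl | hmt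
    · simp
    · have ha : a < idx := (List.pairwise_cons.mp hs).1 idx hmt
      have : decide (idx ≤ a) = false := by simp; omega
      simp only [List.filter_cons, this]
      exact ih (List.pairwise_cons.mp hs).2 hmt

-- A's loop finds the head of the ≥-filter when it is nonempty (no wraparound phase)
theorem pvLoopA_found (processes : List (List (String × Int))) :
    ∀ (fuel : Nat) (idx j : Int), 0 ≤ idx → idx < (processes.length : Int) →
    ((pvRunnable processes).filter (fun x => decide (idx ≤ x))).head? = some j →
    (j - idx).toNat < fuel →
    pvLoopA (processes.length : Int) (pvRunnable processes) fuel idx = j := by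
  intro fuel
  induction fuel with
  | zero => intro idx j _ _ _ h; omega
  | succ f ih =>
    intro idx j h0 h1 hhead hfuel
    have hjmem : j ∈ pvRunnable processes := by
      have := List.mem_of_mem_head? hhead
      exact (List.mem_filter.mp this).1
    have hij : idx ≤ j := by
      have := (List.mem_filter.mp (List.mem_of_mem_head? hhead)).2
      simpa using this
    by_cases hc : (pvRunnable processes).contains idx
    · have hidx : idx ∈ pvRunnable processes := by simpa [List.contains_iff_mem] using hc
      have := pvHeadFilterMem _ idx (pvRunnableSorted processes) hidx
      rw [pvLoopA, if_pos hc]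
      rw [this] at hhead; exact Option.some_inj.mp hhead
    · have hidxnm : idx ∉ pvRunnable processes := by
        simpa [List.contains_iff_mem] using hc
      have hne : j ≠ idx := fun h => hidxnm (h ▸ hjmem)
      have hjb := pvRunnableBounds processes j hjmem
      have h1' : idx + 1 < (processes.length : Int) := by omega
      have hmod : PySem.Int.mod (idx + 1) (processes.length : Int) = idx + 1 := by
        rw [PySem.Int.mod_eq_emod_of_pos (by omega)]
        exact Int.emod_eq_of_lt (by omega) h1'
      rw [pvLoopA, if_neg hc, hmod]
      refine ih (idx + 1) j (by omega) h1' ?_ (by omega)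
      rw [← hhead]
      congr 1
      refine List.filter_congr ?_
      intro x hx
      have : x ≠ idx := fun h => hidxnm (h ▸ hx)
      simp; omega

-- when the ≥-filter is empty the loop walks to 0
theorem pvLoopA_wrap (processes : List (List (String × Int))) :
    ∀ (fuel : Nat) (idx : Int), 0 ≤ idx → idx < (processes.length : Int) →
    (pvRunnable processes).filter (fun x => decide (idx ≤ x)) = [] →
    ((processes.length : Int) - idx).toNat ≤ fuel →
    pvLoopA (processes.length : Int) (pvRunnable processes) fuel idx =
      pvLoopA (processes.length : Int) (pvRunnable processes)
        (fuel - ((processes.length : Int) - idx).toNat) 0 := by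
  intro fuel
  induction fuel with
  | zero => intro idx _ h1 _ hf; omega
  | succ f ih =>
    intro idx h0 h1 hfil hfuel
    have hidxnm : idx ∉ pvRunnable processes := by
      intro hm
      have : idx ∈ (pvRunnable processes).filter (fun x => decide (idx ≤ x)) :=
        List.mem_filter.mpr ⟨hm, by simp⟩
      rw [hfil] at this; cases this
    have hc : ¬ (pvRunnable processes).contains idx = true := by
      simpa [List.contains_iff_mem] using hidxnm
    rw [pvLoopA, if_neg hc, PySem.Int.mod_eq_emod_of_pos (by omega)]
    by_cases hend : idx + 1 = (processes.length : Int)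
    · have hz : (idx + 1) % (processes.length : Int) = 0 := by
        rw [hend]; exact Int.emod_self
      rw [hz]
      have h1 : ((processes.length : Int) - idx).toNat = 1 := by omega
      rw [h1]; rfl
    · have h1' : idx + 1 < (processes.length : Int) := by omega
      have hm : (idx + 1) % (processes.length : Int) = idx + 1 :=
        Int.emod_eq_of_lt (by omega) h1'
      rw [hm]
      have hfil' : (pvRunnable processes).filter (fun x => decide (idx + 1 ≤ x)) = [] := by
        rw [← hfil]
        refine List.filter_congr ?_
        intro x hx
        have : x ≠ idx := fun h => hidxnm (h ▸ hx)
        simp; omega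
      have := ih (idx + 1) (by omega) h1' hfil' (by omega)
      rw [this]
      congr 1; omega

-- B's fold characterization: result components are "first runnable index" and
-- "first runnable index ≥ start", seeded by the incoming state
theorem pvFoldB (start : Int) :
    ∀ (L : List (Int × List (String × Int))) (a g : Option Int),
    L.foldl (pvStepB start) (a, g) =
      ((if a = none then ((L.filter (fun ip => decide (0 < pvRem ip.2))).map (fun ip => ip.1)).head? else a),
       (if g = none then (((L.filter (fun ip => decide (0 < pvRem ip.2))).map (fun ip => ip.1)).filter (fun x => decide (start ≤ x))).head? else g)) := by
  intro L
  induction L with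
  | nil => intro a g; cases a <;> cases g <;> simp
  | cons ip t ih =>
    intro a g
    by_cases hp : 0 < pvRem ip.2
    · have hstep : pvStepB start (a, g) ip =
        ((if a = none then some ip.1 else a), (if g = none ∧ start ≤ ip.1 then some ip.1 else g)) := by
        simp [pvStepB, hp]
      rw [List.foldl_cons, hstep, ih]
      simp only [List.filter_cons, hp, decide_true, if_true, List.map_cons]
      rw [Prod.mk.injEq]
      constructor
      · cases a <;> simp
      · cases g with
        | some x => simp
        | none =>
          by_cases hge : start ≤ ip.1
          · simp [hge]
          · simp [hge]
    · have hstep : pvStepB start (a, g) ip = (a, g) := by simp [pvStepB, hp]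
      have hd : decide (0 < pvRem ip.2) = false := by simpa using hp
      rw [List.foldl_cons, hstep, ih]
      simp [hd]

-- the fold started from (none, none), phrased with pvRunnable
theorem pvFoldB0 (start : Int) (processes : List (List (String × Int))) :
    (PySem.List.enumerate processes).foldl (pvStepB start) (none, none) =
      ((pvRunnable processes).head?,
       ((pvRunnable processes).filter (fun x => decide (start ≤ x))).head?) := by
  rw [pvFoldB]
  simp [pvRunnable]

-- all runnable indices survive the (0 ≤ ·) filter
theorem pvFilterZero (processes : List (List (String × Int))) :
    (pvRunnable processes).filter (fun x => decide ((0:Int) ≤ x)) = pvRunnable processes := by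
  refine List.filter_eq_self.mpr ?_
  intro x hx
  have := (pvRunnableBounds processes x hx).1
  simpa using this

-- ===== VERDICT (by name: the statement is the Claim_ definition above) =====
theorem round_robin_next_process_spec : Claim_equal_round_robin_next_process := by
  intro processes current_index time_quantum _ _
  unfold Spec_round_robin_next_process
  by_cases hempty : processes = []
  · simp [round_robin_next_process, round_robin_next_process_alt, hempty]
  · have hn : 0 < (processes.length : Int) := by
      have : processes.length ≠ 0 := fun h => hempty (List.eq_nil_of_length_eq_zero h)
      omega
    simp only [round_robin_next_process, round_robin_next_process_alt, if_neg hempty,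
      pvFoldB0]
    set s : Int := PySem.Int.mod (current_index + 1) (processes.length : Int) with hs
    have hs0 : 0 ≤ s := by
      rw [hs, PySem.Int.mod_eq_emod_of_pos hn]; exact Int.emod_nonneg _ (by omega)
    have hs1 : s < (processes.length : Int) := by
      rw [hs, PySem.Int.mod_eq_emod_of_pos hn]; exact Int.emod_lt_of_pos _ hn
    by_cases hrun : pvRunnable processes = []
    · rw [if_pos hrun, hrun]
      simp
    · rw [if_neg hrun]
      rcases hfg : ((pvRunnable processes).filter (fun x => decide (s ≤ x))).head? with _ | m
    -- wraparound case: the ≥ s filter is empty, B falls back to first_any = head of runnable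
      · have hfil : (pvRunnable processes).filter (fun x => decide (s ≤ x)) = [] :=
          List.head?_eq_none_iff.mp hfg
        obtain ⟨j, t, hRt⟩ := List.exists_cons_of_ne_nil hrun
        have hjmem : j ∈ pvRunnable processes := by rw [hRt]; exact List.mem_cons_self
        have hjb := pvRunnableBounds processes j hjmem
        have hjlt : j < s := by
          by_contra hge
          have : j ∈ (pvRunnable processes).filter (fun x => decide (s ≤ x)) :=
            List.mem_filter.mpr ⟨hjmem, by simp; omega⟩
          rw [hfil] at this; cases this
        have hwrap := pvLoopA_wrap processes processes.length s hs0 hs1 hfil (by omega)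
        have hfound : pvLoopA (processes.length : Int) (pvRunnable processes)
            (processes.length - ((processes.length : Int) - s).toNat) 0 = j := by
          refine pvLoopA_found processes _ 0 j (by omega) hn ?_ (by omega)
          rw [pvFilterZero, hRt]; rfl
        rw [hwrap, hfound, hRt]
        simp
    -- found case: B picks first_ge = m, A's loop finds m directly
      · have hmmem : m ∈ pvRunnable processes :=
          (List.mem_filter.mp (List.mem_of_mem_head? hfg)).1
        have hmb := pvRunnableBounds processes m hmmem
        have hfound := pvLoopA_found processes processes.length s m hs0 hs1 hfg (by omega)
        rw [hfound]
        simp
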